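-- pv_equiv track=rewrite | github.com/trieschlab/PymoNNto | NetworkBehaviour/Logic/EulerEquationModules/Helper/Helper.py | eq_split
-- ===== SOURCE A (Python) =====
-- def eq_split(eq):
--     str=eq.replace(' ', '')
--     parts = []
--     str_buf = ''
--     for s in str:
--         if s in ['*', '/', '+', '-', '%', ':', ';', '=', '!', '(', ')', '[', ']']:
--             parts.append(str_buf)
--             parts.append(s)
--             str_buf = ''
--         else:
--             str_buf += s
--
--     parts.append(str_buf)
--     return parts
-- ===== SOURCE B (Python) =====
-- _OPS = set('*/+-%:;=!()[]')
--
-- def _split(s):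
--     # split at the FIRST operator, emit prefix and operator, recurse on the rest
--     for i, c in enumerate(s):
--         if c in _OPS:
--             return [s[:i], c] + _split(s[i + 1:])
--     return [s]
--
-- def eq_split(eq):
--     return _split(eq.replace(' ', ''))
-- ===== Notes on version B (the rewrite author's own statement) =====
-- stated objective: alternative
-- what changed: Replaces A's single left-to-right loop with a mutable string buffer by a recursive decomposition: find the first operator, emit the prefix slice and the operator, and recurse on the remainder.
import Mathlib
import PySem

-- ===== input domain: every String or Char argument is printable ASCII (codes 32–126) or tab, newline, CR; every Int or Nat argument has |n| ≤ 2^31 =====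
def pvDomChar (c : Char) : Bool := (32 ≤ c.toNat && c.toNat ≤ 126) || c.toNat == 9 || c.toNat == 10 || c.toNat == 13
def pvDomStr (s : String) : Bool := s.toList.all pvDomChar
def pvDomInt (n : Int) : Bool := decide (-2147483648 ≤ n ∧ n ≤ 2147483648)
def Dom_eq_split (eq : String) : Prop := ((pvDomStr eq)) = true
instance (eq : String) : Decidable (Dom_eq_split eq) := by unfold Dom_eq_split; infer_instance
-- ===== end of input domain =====

-- B changes only the decomposition (recursive split at the first operator vs A's buffer loop); same cost.
-- Strings are modelled as their code-point lists (List Char with String.mk at emission points) — exact on this domain.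

-- ===== PORT A =====
-- 's in ['*', …]' membership test
def pvIsOp (c : Char) : Bool :=
  c == '*' || c == '/' || c == '+' || c == '-' || c == '%' || c == ':' || c == ';' ||
  c == '=' || c == '!' || c == '(' || c == ')' || c == '[' || c == ']'

-- the 'for s in str' loop with state (parts, str_buf)
def pvLoopA : List Char → List String → List Char → List String
  | [], parts, buf => parts ++ [String.mk buf]          -- parts.append(str_buf); return parts
  | c :: cs, parts, buf =>
      if pvIsOp c then pvLoopA cs (parts ++ [String.mk buf, String.mk [c]]) []
      else pvLoopA cs parts (buf ++ [c])

def eq_split (eq : String) : List String :=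
  pvLoopA (PySem.Str.replace eq " " "").toList [] []

-- ===== PORT B =====
-- _split: find the first operator, emit prefix and operator, recurse on the rest (as char lists)
def pvSplitB (cs : List Char) : List (List Char) :=
  let pre := cs.takeWhile (fun c => !pvIsOp c)          -- s[:i] for the first operator index i
  match h : cs.dropWhile (fun c => !pvIsOp c) with
  | [] => [pre]                                          -- no operator: return [s]
  | c :: rest => pre :: [c] :: pvSplitB rest             -- [s[:i], c] + _split(s[i+1:])
termination_by cs.length
decreasing_by
  have := List.length_dropWhile_le (p := fun c => !pvIsOp c) (l := cs)
  rw [h] at this; simpa using Nat.lt_of_lt_of_le (Nat.lt_succ_self _) this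

def eq_split_alt (eq : String) : List String :=
  (pvSplitB (PySem.Str.replace eq " " "").toList).map String.mk

-- ===== PRECONDITION & SPEC =====
def Spec_eq_split (eq : String) (out : List String) : Prop := out = eq_split_alt eq
instance (eq : String) (out : List String) : Decidable (Spec_eq_split eq out) := by unfold Spec_eq_split; infer_instance

-- ===== CLAIM (what is proved, stated in full; the proofs are below) =====
def Claim_equal_eq_split : Prop := ∀ (eq : String), Dom_eq_split eq → Spec_eq_split eq (eq_split eq)

-- ===== LEMMAS AND PROOFS =====

-- prepend buf to the first piece of B's result
def pvConsHead (buf : List Char) : List (List Char) → List (List Char)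
  | [] => [buf]
  | h :: t => (buf ++ h) :: t

theorem pvSplitB_ne_nil (cs : List Char) : pvSplitB cs ≠ [] := by
  unfold pvSplitB; split <;> simp

theorem pvSplitB_drop_nil (cs : List Char)
    (h : cs.dropWhile (fun c => !pvIsOp c) = []) : pvSplitB cs = [cs] := by
  have htw : cs.takeWhile (fun c => !pvIsOp c) = cs := by
    conv_rhs => rw [← List.takeWhile_append_dropWhile (p := fun c => !pvIsOp c) (l := cs)]
    rw [h, List.append_nil]
  conv_lhs => rw [pvSplitB]
  split
  · rw [htw]
  · next c rest h2 => rw [h] at h2; cases h2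

theorem pvSplitB_drop_cons (cs : List Char) (c : Char) (rest : List Char)
    (h : cs.dropWhile (fun c => !pvIsOp c) = c :: rest) :
    pvSplitB cs = cs.takeWhile (fun c => !pvIsOp c) :: [c] :: pvSplitB rest := by
  conv_lhs => rw [pvSplitB]
  split
  · next h2 => rw [h] at h2; cases h2
  · next c' rest' h2 => rw [h] at h2; cases h2; rfl

theorem pvLoopA_no_op (cs : List Char) (hall : ∀ c ∈ cs, pvIsOp c = false) :
    ∀ (parts : List String) (buf : List Char),
    pvLoopA cs parts buf = parts ++ [String.mk (buf ++ cs)] := by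
  induction cs with
  | nil => intro parts buf; simp [pvLoopA]
  | cons c cs ih =>
      intro parts buf
      have hc : pvIsOp c = false := hall c (by simp)
      rw [pvLoopA, if_neg (by simp [hc]), ih (fun c' h' => hall c' (by simp [h']))]
      simp

theorem pvLoopA_eq (cs : List Char) : ∀ (parts : List String) (buf : List Char),
    pvLoopA cs parts buf = parts ++ (pvConsHead buf (pvSplitB cs)).map String.mk := by
  induction cs using pvSplitB.induct with
  | case1 cs h =>
      intro parts buf
      have hall : ∀ c ∈ cs, pvIsOp c = false := by
        intro c hc
        have := (List.dropWhile_eq_nil_iff (p := fun c => !pvIsOp c)).1 h c hc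
        simpa using this
      rw [pvLoopA_no_op cs hall, pvSplitB_drop_nil cs h]
      simp [pvConsHead]
  | case2 cs c rest h ih =>
      intro parts buf
      have hsplit : cs = cs.takeWhile (fun c => !pvIsOp c) ++ (c :: rest) := by
        conv_lhs => rw [← List.takeWhile_append_dropWhile (p := fun c => !pvIsOp c) (l := cs)]
        rw [h]
      have hop : pvIsOp c = true := by
        have := List.head?_dropWhile_not (p := fun c => !pvIsOp c) (l := cs)
        rw [h] at this; simpa using this
      have htw : ∀ x ∈ cs.takeWhile (fun c => !pvIsOp c), pvIsOp x = false := by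
        intro x hx
        have := List.mem_takeWhile_imp hx; simpa using this
      -- run the loop through the operator-free prefix, then across the operator c
      have hpre : ∀ (pre : List Char) (hpre : ∀ x ∈ pre, pvIsOp x = false)
          (parts : List String) (buf : List Char),
          pvLoopA (pre ++ c :: rest) parts buf =
            pvLoopA rest (parts ++ [String.mk (buf ++ pre), String.mk [c]]) [] := by
        intro pre
        induction pre with
        | nil => intro _ parts buf; simp [pvLoopA, hop]
        | cons x xs ihx =>
            intro hx parts buf
            have h1 : pvIsOp x = false := hx x (by simp)
            rw [List.cons_append, pvLoopA, if_neg (by simp [h1]),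
              ihx (fun y hy => hx y (by simp [hy]))]
            simp
      rw [pvSplitB_drop_cons cs c rest h]
      conv_lhs => rw [hsplit]
      rw [hpre _ htw, ih]
      rcases hrec : pvSplitB rest with _ | ⟨hd, tl⟩
      · exact absurd hrec (pvSplitB_ne_nil rest)
      · simp [pvConsHead]

-- ===== VERDICT (by name: the statement is the Claim_ definition above) =====
theorem eq_split_spec : Claim_equal_eq_split := by
  intro eq _
  unfold Spec_eq_split eq_split eq_split_alt
  rw [pvLoopA_eq]
  rcases hrec : pvSplitB (PySem.Str.replace eq " " "").toList with _ | ⟨hd, tl⟩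
  · exact absurd hrec (pvSplitB_ne_nil _)
  · simp [pvConsHead]
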